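-- pv_equiv track=rewrite | github.com/EinAeffchen/advent-of-code-2023 | day02/main.py | sum_ids_by_filter
-- ===== SOURCE A (Python) =====
-- def sum_ids_by_filter(data: dict, game_filter: dict):
--     result = 0
--     for game_id, game_data in data.items():
--         for color, limit in game_filter.items():
--             if any(
--                 [True for round in game_data if round.get(color, 0) > limit]
--             ):
--                 game_id = 0
--         result += game_id
--     return result
-- ===== SOURCE B (Python) =====
-- def sum_ids_by_filter(data: dict, game_filter: dict):
--     result = 0
--     for game_id, rounds in data.items():
--         # phase 1: one pass over the rounds building the per-color maximum index
--         maxes = {}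
--         for rnd in rounds:
--             for color in game_filter:
--                 v = rnd.get(color, 0)
--                 if color not in maxes or v > maxes[color]:
--                     maxes[color] = v
--         # phase 2: compare the materialized maxima against the filter
--         if all(maxes[color] <= limit
--                for color, limit in game_filter.items() if color in maxes):
--             result += game_id
--     return result
-- ===== Notes on version B (the rewrite author's own statement) =====
-- stated objective: alternative
-- what changed: Instead of testing every (color,limit) against each round inline with an any() over a comprehension, B makes one pass per game materializing a dict of per-color maxima and then compares that index against the filter in a separate pass.
import Mathlib
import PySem

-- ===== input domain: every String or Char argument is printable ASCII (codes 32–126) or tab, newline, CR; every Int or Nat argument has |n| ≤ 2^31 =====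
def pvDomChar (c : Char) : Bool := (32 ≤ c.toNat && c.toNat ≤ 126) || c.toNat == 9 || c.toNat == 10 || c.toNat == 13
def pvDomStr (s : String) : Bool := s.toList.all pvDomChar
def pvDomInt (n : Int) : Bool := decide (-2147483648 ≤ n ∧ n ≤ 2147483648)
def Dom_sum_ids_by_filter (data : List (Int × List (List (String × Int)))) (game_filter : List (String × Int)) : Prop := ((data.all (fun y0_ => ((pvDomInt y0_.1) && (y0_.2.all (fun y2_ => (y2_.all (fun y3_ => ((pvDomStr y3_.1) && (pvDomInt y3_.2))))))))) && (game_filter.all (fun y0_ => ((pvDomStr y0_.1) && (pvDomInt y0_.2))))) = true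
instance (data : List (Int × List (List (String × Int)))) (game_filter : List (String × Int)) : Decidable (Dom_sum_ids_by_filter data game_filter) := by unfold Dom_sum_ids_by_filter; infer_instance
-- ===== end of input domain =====

-- B aggregates per-color maxima in one pass over the rounds, then compares them against the filter
-- (alternative decomposition, same value; no speed claim).

-- ===== PORT A =====
def sum_ids_by_filter (data : List (Int × List (List (String × Int)))) (game_filter : List (String × Int)) : Int :=
  data.foldl (fun result g =>
    let game_id := game_filter.foldl (fun gid cl =>
      if ((g.2.filter (fun round => decide ((PySem.Dict.mk round).getD cl.1 0 > cl.2))).map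
            (fun _ => true)).any (fun x => x)
      then 0 else gid) g.1
    result + game_id) 0

-- ===== PORT B =====
def sum_ids_by_filter_alt (data : List (Int × List (List (String × Int)))) (game_filter : List (String × Int)) : Int :=
  data.foldl (fun result g =>
    let maxes := g.2.foldl (fun m rnd =>
      game_filter.foldl (fun m cl =>
        let v := (PySem.Dict.mk rnd).getD cl.1 0
        match m.get? cl.1 with
        | none => m.insert cl.1 v
        | some x => if v > x then m.insert cl.1 v else m) m) PySem.Dict.empty
    if game_filter.all (fun cl =>
        match maxes.get? cl.1 with
        | some x => decide (x ≤ cl.2)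
        | none => true)
    then result + g.1 else result) 0

-- ===== PRECONDITION & SPEC =====
def Spec_sum_ids_by_filter (data : List (Int × List (List (String × Int)))) (game_filter : List (String × Int)) (out : Int) : Prop := out = sum_ids_by_filter_alt data game_filter
instance (data : List (Int × List (List (String × Int)))) (game_filter : List (String × Int)) (out : Int) : Decidable (Spec_sum_ids_by_filter data game_filter out) := by unfold Spec_sum_ids_by_filter; infer_instance

-- ===== CLAIM (what is proved, stated in full; the proofs are below) =====
def Claim_equal_sum_ids_by_filter : Prop := ∀ (data : List (Int × List (List (String × Int)))) (game_filter : List (String × Int)), Dom_sum_ids_by_filter data game_filter → Spec_sum_ids_by_filter data game_filter (sum_ids_by_filter data game_filter)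

-- ===== LEMMAS AND PROOFS =====

-- value a round contributes for a color
def pvVal (rnd : List (String × Int)) (c : String) : Int := (PySem.Dict.mk rnd).getD c 0

-- the per-round update of the maxima dict over the filter entries (B's inner loop)
def pvUpd (game_filter : List (String × Int)) (m : PySem.Dict String Int) (rnd : List (String × Int)) : PySem.Dict String Int :=
  game_filter.foldl (fun m cl =>
    let v := (PySem.Dict.mk rnd).getD cl.1 0
    match m.get? cl.1 with
    | none => m.insert cl.1 v
    | some x => if v > x then m.insert cl.1 v else m) m

def pvComb (o : Option Int) (w : Int) : Option Int :=
  some (match o with | none => w | some x => max x w)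

-- the inner loop's effect on a single key
lemma pvUpd_get? (gf : List (String × Int)) (m : PySem.Dict String Int)
    (rnd : List (String × Int)) (c : String) :
    (pvUpd gf m rnd).get? c =
      if c ∈ gf.map (·.1) then pvComb (m.get? c) (pvVal rnd c) else m.get? c := by
  induction gf generalizing m with
  | nil => simp [pvUpd]
  | cons cl gf ih =>
    obtain ⟨k, lim⟩ := cl
    simp only [pvUpd, List.foldl_cons] at ih ⊢
    rw [ih]
    have hstep : ∀ c' : String, (match m.get? k with
        | none => m.insert k (pvVal rnd k)
        | some x => if pvVal rnd k > x then m.insert k (pvVal rnd k) else m).get? c'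
        = if c' = k then pvComb (m.get? k) (pvVal rnd k) else m.get? c' := by
      intro c'
      cases hm : m.get? k with
      | none => simp [pvComb, PySem.Dict.get?_insert, hm]
      | some x =>
        simp only [pvComb, hm]
        split_ifs with hv h1 h1 <;>
          simp [PySem.Dict.get?_insert, h1, hm] <;> omega
    simp only [pvVal] at hstep ⊢
    rw [hstep c]
    by_cases hc : c = k
    · simp only [hc, List.map_cons, List.mem_cons, true_or, if_true]
      by_cases hmem : k ∈ gf.map (·.1)
      · simp only [hmem, if_true, if_pos rfl]
        cases hm : m.get? k <;> simp [pvComb] <;> omega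
      · simp only [hmem, if_false, if_pos rfl]
    · simp only [hc, List.map_cons, List.mem_cons, false_or, if_false]

-- the outer loop over rounds folds pvComb over the per-round values
lemma pvFold_get? (gf : List (String × Int)) (rounds : List (List (String × Int)))
    (m : PySem.Dict String Int) (c : String) (hc : c ∈ gf.map (·.1)) :
    (rounds.foldl (pvUpd gf) m).get? c =
      (rounds.map (fun r => pvVal r c)).foldl pvComb (m.get? c) := by
  induction rounds generalizing m with
  | nil => simp
  | cons r rounds ih =>
    simp only [List.foldl_cons, List.map_cons]
    rw [ih, pvUpd_get?, if_pos hc]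

def pvP (lim : Int) : Option Int → Bool
  | none => true
  | some x => decide (x ≤ lim)

lemma pvP_foldl (lim : Int) (ws : List Int) (o : Option Int) :
    pvP lim (ws.foldl pvComb o) = (pvP lim o && ws.all (fun w => decide (w ≤ lim))) := by
  induction ws generalizing o with
  | nil => simp
  | cons w ws ih =>
    simp only [List.foldl_cons, List.all_cons]
    rw [ih]
    have : pvP lim (pvComb o w) = (pvP lim o && decide (w ≤ lim)) := by
      cases o <;> simp [pvP, pvComb] <;> omega
    rw [this, Bool.and_assoc]

-- Bool all-congruence over a list
lemma pvAllCongr {α : Type} (l : List α) (f g : α → Bool) (h : ∀ x ∈ l, f x = g x) :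
    l.all f = l.all g := by
  induction l with
  | nil => rfl
  | cons x l ih =>
    simp only [List.all_cons]
    rw [h x (List.mem_cons_self), ih (fun y hy => h y (List.mem_cons_of_mem _ hy))]

-- the comprehension-plus-any in A tests "some round exceeds"
lemma pvAny (rounds : List (List (String × Int))) (c : String) (lim : Int) :
    (((rounds.filter (fun round => decide ((PySem.Dict.mk round).getD c 0 > lim))).map
        (fun _ => true)).any (fun x => x)) =
      !(rounds.all (fun r => decide (pvVal r c ≤ lim))) := by
  induction rounds with
  | nil => rfl
  | cons r rounds ihr =>
    simp only [List.filter_cons, List.all_cons]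
    by_cases h : pvVal r c ≤ lim
    · rw [if_neg (by simp only [pvVal] at h; simp; omega)]
      rw [ihr, decide_eq_true h, Bool.true_and]
    · rw [if_pos (by simp only [pvVal] at h; simp; omega)]
      simp [h]

-- A's inner fold characterised
lemma pvA_fold (gf : List (String × Int)) (rounds : List (List (String × Int))) (gid : Int) :
    gf.foldl (fun gid cl =>
      if ((rounds.filter (fun round => decide ((PySem.Dict.mk round).getD cl.1 0 > cl.2))).map
            (fun _ => true)).any (fun x => x)
      then 0 else gid) gid =
    if gf.all (fun cl => rounds.all (fun r => decide (pvVal r cl.1 ≤ cl.2))) then gid else 0 := by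
  induction gf generalizing gid with
  | nil => simp
  | cons cl gf ih =>
    simp only [List.foldl_cons, List.all_cons]
    rw [pvAny rounds cl.1 cl.2, ih]
    by_cases hA : rounds.all (fun r => decide (pvVal r cl.1 ≤ cl.2)) = true <;>
      by_cases hB : gf.all (fun cl => rounds.all (fun r => decide (pvVal r cl.1 ≤ cl.2))) = true <;>
      simp [hA, hB] at *

-- per-game agreement of the two bodies
lemma pvGame (gf : List (String × Int)) (rounds : List (List (String × Int))) :
    (gf.all (fun cl =>
        match (rounds.foldl (pvUpd gf) PySem.Dict.empty).get? cl.1 with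
        | some x => decide (x ≤ cl.2)
        | none => true)) =
    gf.all (fun cl => rounds.all (fun r => decide (pvVal r cl.1 ≤ cl.2))) := by
  apply pvAllCongr
  intro cl hcl
  have hc : cl.1 ∈ gf.map (·.1) := List.mem_map_of_mem hcl
  have hmatch : (match (rounds.foldl (pvUpd gf) PySem.Dict.empty).get? cl.1 with
      | some x => decide (x ≤ cl.2)
      | none => true) = pvP cl.2 ((rounds.foldl (pvUpd gf) PySem.Dict.empty).get? cl.1) := by
    cases (rounds.foldl (pvUpd gf) PySem.Dict.empty).get? cl.1 <;> rfl
  rw [hmatch, pvFold_get? gf rounds _ cl.1 hc]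
  have : (PySem.Dict.empty : PySem.Dict String Int).get? cl.1 = none := PySem.Dict.get?_empty _
  rw [this, pvP_foldl]
  simp [pvP, List.all_map, Function.comp_def]

-- ===== VERDICT (by name: the statement is the Claim_ definition above) =====
theorem sum_ids_by_filter_spec : Claim_equal_sum_ids_by_filter := by
  intro data gf _
  unfold Spec_sum_ids_by_filter sum_ids_by_filter sum_ids_by_filter_alt
  have hfun : (fun (result : Int) (g : Int × List (List (String × Int))) =>
      result + gf.foldl (fun gid cl =>
        if ((g.2.filter (fun round => decide ((PySem.Dict.mk round).getD cl.1 0 > cl.2))).map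
              (fun _ => true)).any (fun x => x)
        then 0 else gid) g.1) =
      (fun (result : Int) (g : Int × List (List (String × Int))) =>
        if gf.all (fun cl =>
            match (g.2.foldl (pvUpd gf) PySem.Dict.empty).get? cl.1 with
            | some x => decide (x ≤ cl.2)
            | none => true)
        then result + g.1 else result) := by
    funext result g
    rw [pvA_fold, pvGame]
    split_ifs <;> omega
  rw [hfun]
  rfl
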